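-- pv_equiv track=rewrite | github.com/MrBrantCode/unitest_baseline | mut_generate/mist_train_taco/taco_2732/solution.py | reconstruct_3d_matrix
-- ===== SOURCE A (Python) =====
-- def reconstruct_3d_matrix(B, X, Y, Z):
--     A = [[[0 for _ in range(Z)] for _ in range(Y)] for _ in range(X)]
--
--     for i in range(X):
--         for j in range(Y):
--             for k in range(Z):
--                 if i == 0 and j == 0 and k == 0:
--                     A[i][j][k] = B[i][j][k]
--                 elif i == 0 and j == 0:
--                     A[i][j][k] = B[i][j][k] - B[i][j][k - 1]
--                 elif i == 0 and k == 0: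
--                     A[i][j][k] = B[i][j][k] - B[i][j - 1][k]
--                 elif j == 0 and k == 0:
--                     A[i][j][k] = B[i][j][k] - B[i - 1][j][k]
--                 elif i == 0:
--                     A[i][j][k] = B[i][j][k] - B[i][j - 1][k] - B[i][j][k - 1] + B[i][j - 1][k - 1]
--                 elif j == 0:
--                     A[i][j][k] = B[i][j][k] - B[i - 1][j][k] - B[i][j][k - 1] + B[i - 1][j][k - 1]
--                 elif k == 0:
--                     A[i][j][k] = B[i][j][k] - B[i - 1][j][k] - B[i][j - 1][k] + B[i - 1][j - 1][k]
--                 else: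
--                     A[i][j][k] = B[i][j][k] - B[i - 1][j][k] - B[i][j - 1][k] - B[i][j][k - 1] + B[i - 1][j - 1][k] + B[i - 1][j][k - 1] + B[i][j - 1][k - 1] - B[i - 1][j - 1][k - 1]
--
--     return A
-- ===== SOURCE B (Python) =====
-- def reconstruct_3d_matrix(B, X, Y, Z):
--     # Three staged 1D adjacent-difference passes, one per axis (separable inverse
--     # of the 3D prefix sum), instead of one per-cell 8-term branchy formula.
--     def diff(seq, sub):
--         return seq[:1] + [sub(seq[t], seq[t - 1]) for t in range(1, len(seq))]
--     A = [[[B[i][j][k] for k in range(Z)] for j in range(Y)] for i in range(X)]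
--     A = [[diff(row, lambda a, b: a - b) for row in plane] for plane in A]
--     A = [diff(plane, lambda r, s: [a - b for a, b in zip(r, s)]) for plane in A]
--     A = diff(A, lambda p, q: [[a - b for a, b in zip(r, s)] for r, s in zip(p, q)])
--     return A
-- ===== Notes on version B (the rewrite author's own statement) =====
-- stated objective: alternative
-- what changed: Replaces A's single pass with eight boundary-case branches per cell by the separable inverse: three staged 1D adjacent-difference passes, one along each axis, applied to a copied box.
import Mathlib
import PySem

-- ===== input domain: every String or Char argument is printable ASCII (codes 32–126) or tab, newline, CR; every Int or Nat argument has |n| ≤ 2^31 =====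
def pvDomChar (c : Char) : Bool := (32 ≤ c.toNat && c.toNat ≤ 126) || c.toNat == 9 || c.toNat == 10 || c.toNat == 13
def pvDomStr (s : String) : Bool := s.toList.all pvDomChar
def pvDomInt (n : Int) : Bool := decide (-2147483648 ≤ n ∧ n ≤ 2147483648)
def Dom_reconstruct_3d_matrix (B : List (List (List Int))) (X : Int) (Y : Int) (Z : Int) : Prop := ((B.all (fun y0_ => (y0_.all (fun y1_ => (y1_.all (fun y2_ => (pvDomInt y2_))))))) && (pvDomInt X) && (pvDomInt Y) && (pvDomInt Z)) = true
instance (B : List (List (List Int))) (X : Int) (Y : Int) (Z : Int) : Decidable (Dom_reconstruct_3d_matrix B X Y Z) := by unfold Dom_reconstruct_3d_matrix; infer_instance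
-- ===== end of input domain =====

-- B inverts the 3D prefix sum by three staged 1D adjacent-difference passes (one per
-- axis) instead of A's single pass with eight boundary-case branches (objective: alternative).

-- ===== PORT A =====
-- B[i][j][k]: every index A evaluates is nonnegative and (on Pre_) in range, so getD is exact there.
def pvIdx3 (B : List (List (List Int))) (i j k : Nat) : Int :=
  ((B.getD i []).getD j []).getD k 0

def pvCellA (B : List (List (List Int))) (i j k : Nat) : Int :=
  if i = 0 ∧ j = 0 ∧ k = 0 then pvIdx3 B i j k
  else if i = 0 ∧ j = 0 then pvIdx3 B i j k - pvIdx3 B i j (k - 1)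
  else if i = 0 ∧ k = 0 then pvIdx3 B i j k - pvIdx3 B i (j - 1) k
  else if j = 0 ∧ k = 0 then pvIdx3 B i j k - pvIdx3 B (i - 1) j k
  else if i = 0 then pvIdx3 B i j k - pvIdx3 B i (j - 1) k - pvIdx3 B i j (k - 1) + pvIdx3 B i (j - 1) (k - 1)
  else if j = 0 then pvIdx3 B i j k - pvIdx3 B (i - 1) j k - pvIdx3 B i j (k - 1) + pvIdx3 B (i - 1) j (k - 1)
  else if k = 0 then pvIdx3 B i j k - pvIdx3 B (i - 1) j k - pvIdx3 B i (j - 1) k + pvIdx3 B (i - 1) (j - 1) k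
  else pvIdx3 B i j k - pvIdx3 B (i - 1) j k - pvIdx3 B i (j - 1) k - pvIdx3 B i j (k - 1)
       + pvIdx3 B (i - 1) (j - 1) k + pvIdx3 B (i - 1) j (k - 1) + pvIdx3 B i (j - 1) (k - 1)
       - pvIdx3 B (i - 1) (j - 1) (k - 1)

-- Python's range(N) for int N (empty when N ≤ 0); each cell of the preallocated zero
-- array is assigned exactly once, so producing the cells directly is the same program.
def reconstruct_3d_matrix (B : List (List (List Int))) (X : Int) (Y : Int) (Z : Int) : List (List (List Int)) :=
  (List.range X.toNat).map (fun i =>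
    (List.range Y.toNat).map (fun j =>
      (List.range Z.toNat).map (fun k => pvCellA B i j k)))

-- ===== PORT B =====
-- Source B's diff(seq, sub) = seq[:1] + [sub(seq[t], seq[t-1]) for t in 1..len-1]; first
-- element kept, each later element combined with its predecessor — exactly this recursion.
def pvDiff {α : Type} (f : α → α → α) : List α → List α
  | [] => []
  | x :: xs => x :: List.zipWith f xs (x :: xs)

def pvSubRow (r s : List Int) : List Int := List.zipWith (· - ·) r s
def pvSubPlane (p q : List (List Int)) : List (List Int) := List.zipWith pvSubRow p q

def reconstruct_3d_matrix_alt (B : List (List (List Int))) (X : Int) (Y : Int) (Z : Int) : List (List (List Int)) :=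
  let A0 := (List.range X.toNat).map (fun i =>
    (List.range Y.toNat).map (fun j =>
      (List.range Z.toNat).map (fun k => pvIdx3 B i j k)))
  let A1 := A0.map (fun plane => plane.map (pvDiff (· - ·)))   -- difference along k
  let A2 := A1.map (pvDiff pvSubRow)                            -- difference along j
  pvDiff pvSubPlane A2                                          -- difference along i

-- ===== PRECONDITION & SPEC =====
-- Pre_: exactly the inputs on which Python A returns (no IndexError): when all three
-- extents are positive, B must cover the X×Y×Z box (same for B, which indexes identically).
def Pre_reconstruct_3d_matrix (B : List (List (List Int))) (X : Int) (Y : Int) (Z : Int) : Prop :=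
  (0 < X ∧ 0 < Y ∧ 0 < Z) →
    (X.toNat ≤ B.length ∧ ∀ p ∈ B.take X.toNat,
      Y.toNat ≤ p.length ∧ ∀ r ∈ p.take Y.toNat, Z.toNat ≤ r.length)
instance (B : List (List (List Int))) (X : Int) (Y : Int) (Z : Int) : Decidable (Pre_reconstruct_3d_matrix B X Y Z) := by unfold Pre_reconstruct_3d_matrix; infer_instance

def pvWitness_reconstruct_3d_matrix : List (List (List Int)) × Int × Int × Int := ([[[1]]], 1, 1, 1)

def Spec_reconstruct_3d_matrix (B : List (List (List Int))) (X : Int) (Y : Int) (Z : Int) (out : List (List (List Int))) : Prop := out = reconstruct_3d_matrix_alt B X Y Z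
instance (B : List (List (List Int))) (X : Int) (Y : Int) (Z : Int) (out : List (List (List Int))) : Decidable (Spec_reconstruct_3d_matrix B X Y Z out) := by unfold Spec_reconstruct_3d_matrix; infer_instance

-- ===== CLAIM (what is proved, stated in full; the proofs are below) =====
def Claim_equal_reconstruct_3d_matrix : Prop := ∀ (B : List (List (List Int))) (X : Int) (Y : Int) (Z : Int), Dom_reconstruct_3d_matrix B X Y Z → Pre_reconstruct_3d_matrix B X Y Z → Spec_reconstruct_3d_matrix B X Y Z (reconstruct_3d_matrix B X Y Z)

-- ===== LEMMAS AND PROOFS =====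

theorem zip_shift {α : Type} (f : α → α → α) (h : Nat → α) (x : α) (m : Nat) :
    List.zipWith f ((List.range m).map h) (x :: (List.range m).map h)
      = (List.range m).map (fun t => f (h t) (if t = 0 then x else h (t - 1))) := by
  apply List.ext_getElem
  · simp
  · intro t h1 h2
    rw [List.getElem_zipWith]
    cases t with
    | zero => simp
    | succ s => simp

theorem pvDiff_map_range {α : Type} (f : α → α → α) (g : Nat → α) (n : Nat) :
    pvDiff f ((List.range n).map g)
      = (List.range n).map (fun t => if t = 0 then g 0 else f (g t) (g (t - 1))) := by
  cases n with
  | zero => simp [pvDiff]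
  | succ m =>
    rw [List.range_succ_eq_map, List.map_cons, List.map_map, List.map_cons, pvDiff,
        zip_shift f (g ∘ Nat.succ) (g 0) m, List.map_map]
    simp [Function.comp_def]
    intro a _
    rcases a with _ | a <;> simp

theorem zipWith_map_range {α : Type} (f : α → α → α) (g h : Nat → α) (n : Nat) :
    List.zipWith f ((List.range n).map g) ((List.range n).map h)
      = (List.range n).map (fun t => f (g t) (h t)) := by
  apply List.ext_getElem
  · simp
  · intro t h1 h2
    rw [List.getElem_zipWith]
    simp

-- the three staged passes written per cell
def pvC1 (B : List (List (List Int))) (i j k : Nat) : Int :=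
  if k = 0 then pvIdx3 B i j 0 else pvIdx3 B i j k - pvIdx3 B i j (k - 1)
def pvC2 (B : List (List (List Int))) (i j k : Nat) : Int :=
  if j = 0 then pvC1 B i 0 k else pvC1 B i j k - pvC1 B i (j - 1) k
def pvC3 (B : List (List (List Int))) (i j k : Nat) : Int :=
  if i = 0 then pvC2 B 0 j k else pvC2 B i j k - pvC2 B (i - 1) j k

theorem alt_closed (B : List (List (List Int))) (X Y Z : Int) :
    reconstruct_3d_matrix_alt B X Y Z
      = (List.range X.toNat).map (fun i =>
          (List.range Y.toNat).map (fun j =>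
            (List.range Z.toNat).map (fun k => pvC3 B i j k))) := by
  unfold reconstruct_3d_matrix_alt
  simp only [List.map_map, Function.comp_def]
  have h1 : ∀ i j : Nat,
      pvDiff (· - ·) ((List.range Z.toNat).map (fun k => pvIdx3 B i j k))
        = (List.range Z.toNat).map (fun k => pvC1 B i j k) := by
    intro i j; rw [pvDiff_map_range]; rfl
  simp only [h1]
  have h2 : ∀ i : Nat,
      pvDiff pvSubRow ((List.range Y.toNat).map (fun j =>
        (List.range Z.toNat).map (fun k => pvC1 B i j k)))
        = (List.range Y.toNat).map (fun j =>
            (List.range Z.toNat).map (fun k => pvC2 B i j k)) := by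
    intro i
    rw [pvDiff_map_range]
    apply List.map_congr_left
    intro j hj
    by_cases hj0 : j = 0
    · subst hj0; simp [pvC2]
    · simp only [if_neg hj0, pvSubRow, zipWith_map_range]
      apply List.map_congr_left
      intro k _
      simp [pvC2, hj0]
  simp only [h2]
  rw [pvDiff_map_range]
  apply List.map_congr_left
  intro i hi
  by_cases hi0 : i = 0
  · subst hi0; simp [pvC3]
  · simp only [if_neg hi0, pvSubPlane, zipWith_map_range]
    apply List.map_congr_left
    intro j _
    simp only [pvSubRow, zipWith_map_range]
    apply List.map_congr_left
    intro k _
    simp [pvC3, hi0]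

theorem cell_eq (B : List (List (List Int))) (i j k : Nat) :
    pvCellA B i j k = pvC3 B i j k := by
  rcases i with _ | i <;> rcases j with _ | j <;> rcases k with _ | k <;>
    simp [pvCellA, pvC3, pvC2, pvC1] <;> ring

-- ===== VERDICT (by name: the statement is the Claim_ definition above) =====
theorem reconstruct_3d_matrix_spec : Claim_equal_reconstruct_3d_matrix := by
  intro B X Y Z _ _
  unfold Spec_reconstruct_3d_matrix reconstruct_3d_matrix
  rw [alt_closed]
  simp only [cell_eq]
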